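-- pv_equiv track=rewrite | github.com/openQSE/QFw-IQM | scripts/qfw_iqm_util/backend_direct.py | split_qasm_statements
-- ===== SOURCE A (Python) =====
-- def split_qasm_statements(qasm):
-- 	statements = []
-- 	for line in qasm.splitlines():
-- 		line = line.split("//", 1)[0].strip()
-- 		if not line:
-- 			continue
-- 		for part in line.split(";"):
-- 			part = part.strip()
-- 			if part:
-- 				statements.append(part)
-- 	return statements
-- ===== SOURCE B (Python) =====
-- def split_qasm_statements(qasm):
--     # One-pass character scanner: a small state machine over the text with a
--     # statement buffer, a pending-whitespace run and an in-comment flag.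
--     out = []
--     buf = []      # current statement, leading whitespace never enters it
--     pend = []     # trailing whitespace run not yet committed to buf
--     comment = False
--     i = 0
--     n = len(qasm)
--     while i < n:
--         c = qasm[i]
--         if c == '\n' or c == '\r':
--             if buf:
--                 out.append(''.join(buf))
--             buf = []
--             pend = []
--             comment = False
--         elif comment:
--             pass
--         elif c == ';':
--             if buf:
--                 out.append(''.join(buf))
--             buf = []
--             pend = []
--         elif c == '/' and i + 1 < n and qasm[i + 1] == '/':
--             comment = True
--             i += 1
--         elif c == ' ' or c == '\t':
--             if buf:
--                 pend.append(c)
--         else: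
--             buf += pend
--             pend = []
--             buf.append(c)
--         i += 1
--     if buf:
--         out.append(''.join(buf))
--     return out
-- ===== Notes on version B (the rewrite author's own statement) =====
-- stated objective: alternative
-- what changed: Replaces A's staged split/strip pipeline (per line: cut at the comment marker, strip, split on the statement separator, strip each piece) with a single-pass character-level state machine that scans the text once, maintaining a statement buffer, a pending-whitespace run and an in-comment flag, emitting a statement at each separator, line break or end of input.
import Mathlib
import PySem

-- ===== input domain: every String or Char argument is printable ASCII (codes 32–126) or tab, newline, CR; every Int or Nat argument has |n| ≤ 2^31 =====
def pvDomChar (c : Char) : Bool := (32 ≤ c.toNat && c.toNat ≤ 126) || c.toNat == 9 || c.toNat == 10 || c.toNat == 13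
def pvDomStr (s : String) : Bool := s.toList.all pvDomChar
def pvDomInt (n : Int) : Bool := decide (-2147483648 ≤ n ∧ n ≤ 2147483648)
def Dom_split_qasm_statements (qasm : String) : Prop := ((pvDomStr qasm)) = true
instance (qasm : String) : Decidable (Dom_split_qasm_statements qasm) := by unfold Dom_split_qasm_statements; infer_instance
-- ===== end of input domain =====

-- B replaces A's split/strip pipeline with a one-pass character scanner (state machine:
-- statement buffer, pending-whitespace run, in-comment flag); same cost, different structure.

-- ===== PORT A =====
-- line.split("//", 1)[0]: str.split with a nonempty separator always returns a nonempty
-- list, so the [0] never raises; it is ported as .headD "".  Likewise split?/splitMax?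
-- return some (the separators "//" and ";" are nonempty), so .getD [] is exact.
def split_qasm_statements (qasm : String) : List String :=
  (PySem.Str.splitlines qasm).foldl (fun statements line =>
    let line := PySem.Str.strip (((PySem.Str.splitMax? line "//" 1).getD []).headD "")
    if line = "" then statements
    else ((PySem.Str.split? line ";").getD []).foldl (fun statements part =>
      let part := PySem.Str.strip part
      if part ≠ "" then statements ++ [part] else statements) statements) []

-- ===== PORT B =====
-- the while-loop of Source B: out/buf/pend/comment are its state, the list is the unread
-- characters; the Python lookahead qasm[i+1] is rest.head?.
def pvAltGo (out : List String) (buf pend : List Char) (comment : Bool) : List Char → List String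
  | [] => if buf ≠ [] then out ++ [String.ofList buf] else out
  | c :: rest =>
    if c = '\n' ∨ c = '\r' then
      pvAltGo (if buf ≠ [] then out ++ [String.ofList buf] else out) [] [] false rest
    else if comment then
      pvAltGo out buf pend comment rest
    else if c = ';' then
      pvAltGo (if buf ≠ [] then out ++ [String.ofList buf] else out) [] [] comment rest
    else if c = '/' ∧ rest.head? = some '/' then
      pvAltGo out buf pend true rest.tail
    else if c = ' ' ∨ c = '\t' then
      pvAltGo out buf (if buf ≠ [] then pend ++ [c] else pend) comment rest
    else
      pvAltGo out (buf ++ pend ++ [c]) [] comment rest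
termination_by cs => cs.length
decreasing_by
  · simp
  · simp
  · simp
  · simp only [List.length_cons, List.length_tail]
    omega
  · simp
  · simp

def split_qasm_statements_alt (qasm : String) : List String :=
  pvAltGo [] [] [] false qasm.toList

-- ===== PRECONDITION & SPEC =====
def Spec_split_qasm_statements (qasm : String) (out : List String) : Prop := out = split_qasm_statements_alt qasm
instance (qasm : String) (out : List String) : Decidable (Spec_split_qasm_statements qasm out) := by unfold Spec_split_qasm_statements; infer_instance

-- ===== CLAIM (what is proved, stated in full; the proofs are below) =====
def Claim_equal_split_qasm_statements : Prop := ∀ (qasm : String), Dom_split_qasm_statements qasm → Spec_split_qasm_statements qasm (split_qasm_statements qasm)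

-- ===== LEMMAS AND PROOFS =====

-- A simple structural recursion computing Python's s.split(c) for a one-character separator.
def splitC (c : Char) : List Char → List (List Char)
  | [] => [[]]
  | x :: xs =>
    if x = c then [] :: splitC c xs
    else match splitC c xs with
      | [] => [[x]]
      | p :: ps => (x :: p) :: ps

theorem splitC_ne_nil (c : Char) (s : List Char) : splitC c s ≠ [] := by
  cases s with
  | nil => simp [splitC]
  | cons x xs =>
    simp only [splitC]
    split
    · simp
    · split <;> simp

theorem go_eq (c : Char) (s : List Char) : ∀ (fuel : ℕ) (cur : List Char)
    (acc : List (List Char)), s.length ≤ fuel →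
    PySem.Chars.splitOn.go [c] fuel s cur acc
      = acc.reverse ++ (splitC c s).modifyHead (cur.reverse ++ ·) := by
  induction s with
  | nil =>
    intro fuel cur acc _
    cases fuel <;> simp [PySem.Chars.splitOn.go, splitC]
  | cons x xs ih =>
    intro fuel cur acc hlen
    cases fuel with
    | zero => simp at hlen
    | succ f =>
      by_cases hx : x = c
      · subst hx
        have hpre : [x].isPrefixOf (x :: xs) = true := by simp [List.isPrefixOf]
        simp only [PySem.Chars.splitOn.go, hpre, if_pos]
        rw [show List.drop [x].length (x :: xs) = xs by simp]
        rw [ih f [] (cur.reverse :: acc) (by simpa using Nat.le_of_succ_le_succ hlen)]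
        obtain ⟨p, ps, hps⟩ := List.exists_cons_of_ne_nil (splitC_ne_nil x xs)
        simp [splitC, hps]
      · have hpre : [c].isPrefixOf (x :: xs) = false := by
          simp [List.isPrefixOf]
          exact fun h => (hx h.symm).elim
        simp only [PySem.Chars.splitOn.go, hpre]
        rw [ih f (x :: cur) acc (by simpa using Nat.le_of_succ_le_succ hlen)]
        obtain ⟨p, ps, hps⟩ := List.exists_cons_of_ne_nil (splitC_ne_nil c xs)
        simp [splitC, hps, if_neg hx]

theorem splitOn_eq_splitC (c : Char) (s : List Char) :
    PySem.Chars.splitOn s [c] = splitC c s := by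
  unfold PySem.Chars.splitOn
  rw [go_eq c s (s.length + 1) [] [] (by omega)]
  obtain ⟨p, ps, hps⟩ := List.exists_cons_of_ne_nil (splitC_ne_nil c s)
  simp [hps]

theorem splitC_append (c : Char) (a b : List Char) :
    splitC c (a ++ c :: b) = splitC c a ++ splitC c b := by
  induction a with
  | nil => simp [splitC]
  | cons x a' ih =>
    by_cases hx : x = c
    · subst hx; simp [splitC, ih]
    · obtain ⟨p, ps, hps⟩ := List.exists_cons_of_ne_nil (splitC_ne_nil c a')
      simp only [List.cons_append, splitC, if_neg hx, ih, hps]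

-- comment-and-whitespace cleaning of one line, at the character level
def clC (l : List Char) : List Char :=
  PySem.Chars.strip ((PySem.Chars.splitOnMax l ['/', '/'] 1).headD [])

-- the statements contributed by one cleaned line
def gC (l : List Char) : List (List Char) :=
  ((splitC ';' (clC l)).map PySem.Chars.strip).filter (fun p => p ≠ [])

theorem clean_ofList (lc : List Char) :
    PySem.Str.strip (((PySem.Str.splitMax? (String.ofList lc) "//" 1).getD []).headD "")
      = String.ofList (clC lc) := by
  have hsep : ("//" : String).toList = ['/', '/'] := by decide
  simp [PySem.Str.splitMax?, PySem.Chars.splitMax?, hsep, PySem.Str.strip, clC]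

theorem split_getD (s : String) :
    (PySem.Str.split? s ";").getD [] = (splitC ';' s.toList).map String.ofList := by
  have hsep : (";" : String).toList = [';'] := by decide
  simp [PySem.Str.split?, PySem.Chars.split?, hsep, splitOn_eq_splitC]

theorem fold_part (ps : List (List Char)) (st : List String) :
    ps.foldl (fun st p =>
        let part := PySem.Str.strip (String.ofList p)
        if part ≠ "" then st ++ [part] else st) st
      = st ++ ((ps.map PySem.Chars.strip).filter (fun p => p ≠ [])).map String.ofList := by
  induction ps generalizing st with
  | nil => simp
  | cons p ps ih =>
    rw [List.foldl_cons, ih]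
    by_cases h : PySem.Chars.strip p = []
    · have h1 : PySem.Str.strip (String.ofList p) = "" := by
        simp only [PySem.Str.strip, String.toList_ofList, h]
      simp [h1, h]
    · simp [h, PySem.Str.strip, List.append_assoc]

theorem gC_of_empty (lc : List Char) (h : clC lc = []) : gC lc = [] := by
  simp [gC, h, splitC]; decide

theorem fold_line (lines : List (List Char)) (init : List String) :
    lines.foldl (fun statements lc =>
      let line := String.ofList (clC lc)
      if line = "" then statements
      else ((PySem.Str.split? line ";").getD []).foldl (fun statements part =>
        let part := PySem.Str.strip part
        if part ≠ "" then statements ++ [part] else statements) statements) init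
      = init ++ (lines.flatMap gC).map String.ofList := by
  induction lines generalizing init with
  | nil => simp
  | cons lc lines ih =>
    rw [List.foldl_cons, ih]
    by_cases h : clC lc = []
    · have he : String.ofList (clC lc) = "" := by simp [h]
      simp [he, gC_of_empty lc h]
    · have hne : ¬ String.ofList (clC lc) = "" := by
        simp [h]
      simp only [if_neg hne, split_getD, String.toList_ofList, List.foldl_map]
      rw [fold_part]
      simp [gC, List.append_assoc]

theorem A_eq (qasm : String) :
    split_qasm_statements qasm
      = ((PySem.Chars.splitlines qasm.toList).flatMap gC).map String.ofList := by
  unfold split_qasm_statements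
  rw [PySem.Str.splitlines, List.foldl_map]
  have hfun : (fun (statements : List String) (lc : List Char) =>
      let line := PySem.Str.strip (((PySem.Str.splitMax? (String.ofList lc) "//" 1).getD []).headD "")
      if line = "" then statements
      else ((PySem.Str.split? line ";").getD []).foldl (fun statements part =>
        let part := PySem.Str.strip part
        if part ≠ "" then statements ++ [part] else statements) statements)
      = (fun (statements : List String) (lc : List Char) =>
      let line := String.ofList (clC lc)
      if line = "" then statements
      else ((PySem.Str.split? line ";").getD []).foldl (fun statements part =>
        let part := PySem.Str.strip part
        if part ≠ "" then statements ++ [part] else statements) statements) := by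
    funext st lc
    simp only [clean_ofList]
  rw [hfun, fold_line]
  simp

-- ===== B-side proof machinery: the scanner vs. the per-line pipeline =====

-- the prefix of a line before its first "//"
def cutR : List Char → List Char
  | [] => []
  | c :: rest => if c = '/' ∧ rest.head? = some '/' then [] else c :: cutR rest

-- the statements of one comment-free line: split on ';', strip, drop empties
def stmts (s : List Char) : List (List Char) :=
  ((splitC ';' s).map PySem.Chars.strip).filter (fun p => p ≠ [])

-- splitlines under Dom (only '\n', '\r', '\r\n' breaks), recursively
def linesM : List Char → List (List Char)
  | [] => []
  | c :: r =>
    if c = '\r' ∧ r.head? = some '\n' then [] :: linesM r.tail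
    else if c = '\n' ∨ c = '\r' then [] :: linesM r
    else match linesM r with
      | [] => [[c]]
      | p :: ps => (c :: p) :: ps
termination_by cs => cs.length
decreasing_by
  · simp only [List.length_cons, List.length_tail]
    omega
  · simp
  · simp

-- current line of cs, and what follows its line break
def flCs (cs : List Char) : List Char := cs.takeWhile (fun c => !(c = '\n' || c = '\r'))
def restL (cs : List Char) : List Char :=
  match cs.dropWhile (fun c => !(c = '\n' || c = '\r')) with
  | [] => []
  | c :: r => if c = '\r' ∧ r.head? = some '\n' then r.tail else r

theorem char_eq_of_toNat {c d : Char} (h : c.toNat = d.toNat) : c = d := by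
  apply Char.ext
  exact UInt32.toNat.inj h

theorem dom_not_ws {c : Char} (hd : pvDomChar c = true) (h1 : c ≠ ' ') (h2 : c ≠ '\t')
    (h3 : c ≠ '\n') (h4 : c ≠ '\r') : PySem.Chars.isspace c = false := by
  have e1 : c.toNat ≠ 32 := fun h => h1 (char_eq_of_toNat h)
  have e2 : c.toNat ≠ 9 := fun h => h2 (char_eq_of_toNat h)
  have e3 : c.toNat ≠ 10 := fun h => h3 (char_eq_of_toNat h)
  have e4 : c.toNat ≠ 13 := fun h => h4 (char_eq_of_toNat h)
  simp [pvDomChar] at hd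
  simp [PySem.Chars.isspace]
  omega

theorem ws_ne_semi {c : Char} (h : PySem.Chars.isspace c = true) : c ≠ ';' := by
  intro he; subst he; simp [PySem.Chars.isspace] at h

theorem strip_cons_ws {c : Char} (h : PySem.Chars.isspace c = true) (p : List Char) :
    PySem.Chars.strip (c :: p) = PySem.Chars.strip p := by
  simp [PySem.Chars.strip, PySem.Chars.lstrip, h]

theorem rstrip_snoc_ws {c : Char} (h : PySem.Chars.isspace c = true) (p : List Char) :
    PySem.Chars.rstrip (p ++ [c]) = PySem.Chars.rstrip p := by
  simp [PySem.Chars.rstrip, h]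

theorem strip_snoc_ws {c : Char} (h : PySem.Chars.isspace c = true) (p : List Char) :
    PySem.Chars.strip (p ++ [c]) = PySem.Chars.strip p := by
  simp only [PySem.Chars.strip, PySem.Chars.lstrip]
  rw [List.dropWhile_append]
  by_cases he : (p.dropWhile PySem.Chars.isspace).isEmpty
  · rw [if_pos he]
    simp only [List.isEmpty_iff] at he
    rw [he, List.dropWhile_cons, if_pos h]
    simp
  · rw [if_neg he, rstrip_snoc_ws h]

theorem stmts_ws_cons {c : Char} (h : PySem.Chars.isspace c = true) (s : List Char) :
    stmts (c :: s) = stmts s := by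
  obtain ⟨p, ps, hps⟩ := List.exists_cons_of_ne_nil (splitC_ne_nil ';' s)
  simp only [stmts, splitC, if_neg (ws_ne_semi h), hps, List.map_cons, List.filter_cons,
    strip_cons_ws h]

def snocLast (c : Char) : List (List Char) → List (List Char)
  | [] => []
  | [p] => [p ++ [c]]
  | p :: ps => p :: snocLast c ps

theorem snocLast_cons_cons (c : Char) (p q : List Char) (ps : List (List Char)) :
    snocLast c (p :: q :: ps) = p :: snocLast c (q :: ps) := rfl

theorem splitC_snoc {c : Char} (hc : c ≠ ';') (s : List Char) :
    splitC ';' (s ++ [c]) = snocLast c (splitC ';' s) := by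
  induction s with
  | nil => simp [splitC, hc, snocLast]
  | cons x s ih =>
    by_cases hx : x = ';'
    · subst hx
      obtain ⟨p, ps, hps⟩ := List.exists_cons_of_ne_nil (splitC_ne_nil ';' s)
      simp [splitC, ih, hps, snocLast_cons_cons]
    · obtain ⟨p, ps, hps⟩ := List.exists_cons_of_ne_nil (splitC_ne_nil ';' s)
      rw [hps] at ih
      cases ps with
      | nil =>
        simp only [List.cons_append, splitC, if_neg hx, hps, ih, snocLast]
      | cons q qs =>
        simp only [List.cons_append, splitC, if_neg hx, hps, ih, snocLast_cons_cons]

theorem map_strip_snocLast {c : Char} (h : PySem.Chars.isspace c = true) (ps : List (List Char)) :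
    (snocLast c ps).map PySem.Chars.strip = ps.map PySem.Chars.strip := by
  induction ps with
  | nil => rfl
  | cons p ps ih =>
    cases ps with
    | nil => simp [snocLast, strip_snoc_ws h]
    | cons q qs => simp only [snocLast_cons_cons, List.map_cons, ih]

theorem stmts_snoc_ws {c : Char} (h : PySem.Chars.isspace c = true) (s : List Char) :
    stmts (s ++ [c]) = stmts s := by
  simp only [stmts, splitC_snoc (ws_ne_semi h), map_strip_snocLast h]

theorem stmts_append_ws_left (w s : List Char) (h : ∀ c ∈ w, PySem.Chars.isspace c = true) :
    stmts (w ++ s) = stmts s := by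
  induction w with
  | nil => rfl
  | cons c w ih =>
    rw [List.cons_append, stmts_ws_cons (h c (by simp)), ih (fun c hc => h c (by simp [hc]))]

theorem stmts_append_ws_right (w : List Char) : ∀ (s : List Char),
    (∀ c ∈ w, PySem.Chars.isspace c = true) → stmts (s ++ w) = stmts s := by
  induction w with
  | nil => simp
  | cons c w ih =>
    intro s h
    rw [show s ++ c :: w = (s ++ [c]) ++ w by simp, ih _ (fun c hc => h c (by simp [hc])),
      stmts_snoc_ws (h c (by simp))]

theorem stmts_strip (s : List Char) : stmts (PySem.Chars.strip s) = stmts s := by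
  have hsplit : s.takeWhile PySem.Chars.isspace ++ s.dropWhile PySem.Chars.isspace = s :=
    List.takeWhile_append_dropWhile
  have h1 : stmts s = stmts (PySem.Chars.lstrip s) := by
    conv_lhs => rw [← hsplit]
    exact stmts_append_ws_left _ _ (fun c hc => List.mem_takeWhile_imp hc)
  set t := PySem.Chars.lstrip s with ht
  have h2 : PySem.Chars.rstrip t ++ (t.reverse.takeWhile PySem.Chars.isspace).reverse = t := by
    simp only [PySem.Chars.rstrip]
    rw [← List.reverse_append, List.takeWhile_append_dropWhile, List.reverse_reverse]
  have h3 : stmts t = stmts (PySem.Chars.rstrip t) := by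
    conv_lhs => rw [← h2]
    exact stmts_append_ws_right _ _
      (fun c hc => List.mem_takeWhile_imp (List.mem_reverse.mp hc))
  rw [h1]
  rw [show PySem.Chars.strip s = PySem.Chars.rstrip t from rfl, ← h3]

-- splitOnMax with maxsplit 1: its head is cutR
theorem go0 (sep : List Char) (fuel : ℕ) (l cur : List Char) (acc : List (List Char)) :
    PySem.Chars.splitOnMax.go sep fuel 0 l cur acc = ((cur.reverse ++ l) :: acc).reverse := by
  cases fuel with
  | zero => rfl
  | succ f => cases l with
    | nil => simp [PySem.Chars.splitOnMax.go]
    | cons c r => simp [PySem.Chars.splitOnMax.go]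

theorem cut_head : ∀ (fuel : ℕ) (l cur : List Char), l.length ≤ fuel →
    ∃ ts, PySem.Chars.splitOnMax.go ['/', '/'] fuel 1 l cur [] = (cur.reverse ++ cutR l) :: ts := by
  intro fuel
  induction fuel with
  | zero =>
    intro l cur hl
    rw [List.length_eq_zero_iff.mp (Nat.le_zero.mp hl)]
    exact ⟨[], by simp [PySem.Chars.splitOnMax.go, cutR]⟩
  | succ f ih =>
    intro l cur hl
    cases l with
    | nil => exact ⟨[], by simp [PySem.Chars.splitOnMax.go, cutR]⟩
    | cons c r =>
      by_cases hp : c = '/' ∧ r.head? = some '/'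
      · obtain ⟨hc, hr⟩ := hp
        subst hc
        obtain ⟨r2, hr2⟩ : ∃ r2, r = '/' :: r2 := by
          cases r with
          | nil => simp at hr
          | cons d r2 => exact ⟨r2, by simp at hr; rw [hr]⟩
        subst hr2
        have hpre : List.isPrefixOf ['/', '/'] ('/' :: '/' :: r2) = true := by
          simp [List.isPrefixOf]
        rw [show PySem.Chars.splitOnMax.go ['/', '/'] (f + 1) 1 ('/' :: '/' :: r2) cur []
            = PySem.Chars.splitOnMax.go ['/', '/'] f 0 (List.drop 2 ('/' :: '/' :: r2)) []
                [cur.reverse] from by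
          simp only [PySem.Chars.splitOnMax.go, hpre, if_pos]
          norm_num]
        rw [go0]
        exact ⟨[List.drop 2 ('/' :: '/' :: r2)], by simp [cutR]⟩
      · have hpre : List.isPrefixOf ['/', '/'] (c :: r) = false := by
          by_contra hcon
          rw [Bool.not_eq_false] at hcon
          apply hp
          cases r with
          | nil => simp [List.isPrefixOf] at hcon
          | cons d r2 =>
            simp [List.isPrefixOf] at hcon
            exact ⟨hcon.1.symm, by simp [hcon.2.symm]⟩
        simp only [PySem.Chars.splitOnMax.go, hpre]
        norm_num
        obtain ⟨ts, hts⟩ := ih r (c :: cur) (by simpa using Nat.le_of_succ_le_succ hl)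
        refine ⟨ts, ?_⟩
        rw [hts]
        simp [cutR, if_neg hp]

theorem clC_eq_cutR (l : List Char) : clC l = PySem.Chars.strip (cutR l) := by
  unfold clC PySem.Chars.splitOnMax
  obtain ⟨ts, hts⟩ := cut_head (l.length + 1) l [] (by omega)
  norm_num
  rw [hts]
  simp

theorem gC_stmts (l : List Char) : gC l = stmts (cutR l) := by
  show stmts (clC l) = stmts (cutR l)
  rw [clC_eq_cutR, stmts_strip]

theorem splitC_no_sep (s : List Char) (h : ∀ x ∈ s, x ≠ ';') : splitC ';' s = [s] := by
  induction s with
  | nil => rfl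
  | cons x s ih =>
    rw [splitC, if_neg (h x (by simp)), ih (fun y hy => h y (by simp [hy]))]

theorem stmts_semi (a b : List Char) : stmts (a ++ ';' :: b) = stmts a ++ stmts b := by
  simp [stmts, splitC_append]

-- flushing the scanner's buffer is exactly the statements of buf ++ pend
theorem flush_eq (buf pend : List Char)
    (hh : ∀ x, buf.head? = some x → PySem.Chars.isspace x = false)
    (hl : ∀ x, buf.getLast? = some x → PySem.Chars.isspace x = false)
    (hs : ∀ x ∈ buf, x ≠ ';')
    (hp : ∀ x ∈ pend, PySem.Chars.isspace x = true)
    (he : buf = [] → pend = []) :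
    stmts (buf ++ pend) = if buf = [] then [] else [buf] := by
  by_cases hb : buf = []
  · subst hb
    rw [he rfl]
    simp [stmts, splitC]
    decide
  · rw [if_neg hb, stmts_append_ws_right pend buf hp]
    have hstrip : PySem.Chars.strip buf = buf := by
      have h1 : PySem.Chars.lstrip buf = buf := by
        cases buf with
        | nil => rfl
        | cons x t =>
          simp [PySem.Chars.lstrip, hh x rfl]
      have h2 : PySem.Chars.rstrip buf = buf := by
        cases hrev : buf.reverse with
        | nil =>
          rw [List.reverse_eq_nil_iff.mp hrev]
          rfl
        | cons x t =>
          have hx : buf.getLast? = some x := by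
            rw [← List.head?_reverse, hrev]; rfl
          show (List.dropWhile PySem.Chars.isspace buf.reverse).reverse = buf
          rw [hrev, List.dropWhile_cons, hl x hx]
          simp only [Bool.false_eq_true, if_false]
          rw [← hrev, List.reverse_reverse]
      simp [PySem.Chars.strip, h1, h2]
    rw [stmts, splitC_no_sep buf hs]
    simp [hstrip, hb]

-- linesM unfolds one line at a time
theorem linesM_ne_nil (cs : List Char) (h : cs ≠ []) : linesM cs ≠ [] := by
  cases cs with
  | nil => exact absurd rfl h
  | cons c r =>
    rw [linesM]
    split
    · simp
    · split
      · simp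
      · split <;> simp

theorem flCs_cons_of_brk {c : Char} {r : List Char} (h : c = '\n' ∨ c = '\r') :
    flCs (c :: r) = [] := by
  rcases h with h | h <;> subst h <;> simp [flCs]

theorem flCs_cons_of_not {c : Char} {r : List Char} (h1 : c ≠ '\n') (h2 : c ≠ '\r') :
    flCs (c :: r) = c :: flCs r := by
  simp [flCs, h1, h2]

theorem restL_cons_of_not {c : Char} {r : List Char} (h1 : c ≠ '\n') (h2 : c ≠ '\r') :
    restL (c :: r) = restL r := by
  simp [restL, h1, h2]

theorem restL_rn (r : List Char) : restL ('\r' :: '\n' :: r) = r := by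
  simp [restL]

theorem restL_cons_brk {c : Char} {r : List Char} (h : c = '\n' ∨ c = '\r')
    (h2 : ¬ (c = '\r' ∧ r.head? = some '\n')) : restL (c :: r) = r := by
  rcases h with h | h <;> subst h
  · simp [restL]
  · simp only [restL, List.dropWhile_cons]
    norm_num
    intro hh
    exact absurd ⟨rfl, hh⟩ h2

theorem linesM_first : ∀ (cs : List Char),
    linesM cs = if cs = [] then [] else flCs cs :: linesM (restL cs) := by
  have H : ∀ (n : ℕ) (cs : List Char), cs.length ≤ n →
      linesM cs = if cs = [] then [] else flCs cs :: linesM (restL cs) := by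
    intro n
    induction n with
    | zero =>
      intro cs h
      rw [List.length_eq_zero_iff.mp (Nat.le_zero.mp h)]
      simp [linesM]
    | succ m ih =>
      intro cs h
      cases cs with
      | nil => simp [linesM]
      | cons c r =>
        rw [if_neg (by simp : ¬(c :: r = []))]
        by_cases h1 : c = '\r' ∧ r.head? = some '\n'
        · obtain ⟨r2, hr2⟩ : ∃ r2, r = '\n' :: r2 := by
            cases r with
            | nil => simp at h1
            | cons d r2 => exact ⟨r2, by obtain ⟨-, hd⟩ := h1; simp at hd; rw [hd]⟩
          obtain ⟨hc, -⟩ := h1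
          subst hc; subst hr2
          rw [linesM]
          rw [if_pos ⟨rfl, rfl⟩]
          rw [flCs_cons_of_brk (Or.inr rfl), restL_rn]
          rfl
        · rw [linesM, if_neg h1]
          by_cases h2 : c = '\n' ∨ c = '\r'
          · rw [if_pos h2, flCs_cons_of_brk h2, restL_cons_brk h2 h1]
          · have hn : c ≠ '\n' := fun e => h2 (Or.inl e)
            have hrr : c ≠ '\r' := fun e => h2 (Or.inr e)
            rw [if_neg h2, flCs_cons_of_not hn hrr, restL_cons_of_not hn hrr]
            rw [ih r (by simpa using Nat.le_of_succ_le_succ h)]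
            by_cases hr : r = []
            · subst hr
              simp [flCs, restL, linesM]
            · rw [if_neg hr]
  intro cs
  exact H cs.length cs le_rfl

theorem flat_first (cs : List Char) :
    (linesM cs).flatMap gC = stmts (cutR (flCs cs)) ++ (linesM (restL cs)).flatMap gC := by
  rw [linesM_first cs]
  by_cases h : cs = []
  · subst h
    simp [restL, linesM, flCs, show stmts (cutR ([] : List Char)) = [] from by decide]
  · rw [if_neg h]
    simp [gC_stmts]

-- splitlines = linesM on the domain
def pyB (c : Char) : Bool :=
  have n := c.toNat
  decide (n = 10) || decide (n = 13) || decide (n = 11) || decide (n = 12) || decide (n = 28) ||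
    decide (n = 29) || decide (n = 30) || decide (n = 133) || decide (n = 8232) || decide (n = 8233)

theorem pyB_dom {c : Char} (h : pvDomChar c = true) : pyB c = (c = '\n' || c = '\r') := by
  simp only [pvDomChar, Bool.or_eq_true, Bool.and_eq_true, decide_eq_true_eq, beq_iff_eq] at h
  by_cases h10 : c.toNat = 10
  · have : c = '\n' := char_eq_of_toNat h10
    subst this; rfl
  by_cases h13 : c.toNat = 13
  · have : c = '\r' := char_eq_of_toNat h13
    subst this; rfl
  have e3 : c ≠ '\n' := fun he => h10 (by rw [he]; rfl)
  have e4 : c ≠ '\r' := fun he => h13 (by rw [he]; rfl)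
  simp [pyB, e3, e4]
  omega

theorem go_cons (isB : Char → Bool) (c : Char) (rest cur : List Char) (acc : List (List Char))
    (h : ¬ (c = '\r' ∧ rest.head? = some '\n')) :
    PySem.Chars.splitlines.go isB (c :: rest) cur acc
      = if isB c then PySem.Chars.splitlines.go isB rest [] (cur.reverse :: acc)
        else PySem.Chars.splitlines.go isB rest (c :: cur) acc := by
  rw [PySem.Chars.splitlines.go.eq_def]
  split
  · simp at *
  · rename_i h1 h2
    exact absurd (by injection h2 with e1 e2; exact ⟨e1, by rw [e2]; rfl⟩) h
  · rename_i heq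
    injection heq with e1 e2
    subst e1; subst e2
    rfl

theorem go_lines : ∀ (n : ℕ) (cs : List Char), cs.length ≤ n →
    (∀ c ∈ cs, pvDomChar c = true) → ∀ (cur : List Char) (acc : List (List Char)),
    PySem.Chars.splitlines.go pyB cs cur acc
      = acc.reverse ++ (if cur = [] ∧ cs = [] then []
          else (cur.reverse ++ (linesM cs).headD []) :: (linesM cs).tail) := by
  intro n
  induction n with
  | zero =>
    intro cs h hd cur acc
    rw [List.length_eq_zero_iff.mp (Nat.le_zero.mp h)]
    by_cases hc : cur = [] <;>
      simp [PySem.Chars.splitlines.go, hc, List.isEmpty_iff, linesM]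
  | succ m ih =>
    intro cs h hd cur acc
    cases cs with
    | nil =>
      by_cases hc : cur = [] <;>
        simp [PySem.Chars.splitlines.go, hc, List.isEmpty_iff, linesM]
    | cons c r =>
      by_cases h1 : c = '\r' ∧ r.head? = some '\n'
      · obtain ⟨hc, hr⟩ := h1
        subst hc
        obtain ⟨r2, hr2⟩ : ∃ r2, r = '\n' :: r2 := by
          cases r with
          | nil => simp at hr
          | cons d r2 => exact ⟨r2, by simp at hr; rw [hr]⟩
        subst hr2
        have : PySem.Chars.splitlines.go pyB ('\r' :: '\n' :: r2) cur acc
            = PySem.Chars.splitlines.go pyB r2 [] (cur.reverse :: acc) := rfl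
        rw [this, ih r2 (by simp at h; omega) (fun x hx => hd x (by simp [hx])) [] _]
        have hlm : linesM ('\r' :: '\n' :: r2) = [] :: linesM r2 := by
          rw [linesM]; simp
        rw [hlm]
        by_cases hr2e : r2 = []
        · subst hr2e
          simp [linesM]
        · have := linesM_ne_nil r2 hr2e
          obtain ⟨p, ps, hps⟩ := List.exists_cons_of_ne_nil this
          simp [hps, hr2e]
      · rw [go_cons pyB c r cur acc h1]
        rw [pyB_dom (hd c (by simp))]
        by_cases h2 : c = '\n' ∨ c = '\r'
        · have hb : (c = '\n' || c = '\r') = true := by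
            rcases h2 with h2 | h2 <;> simp [h2]
          rw [hb, if_pos rfl]
          rw [ih r (by simp at h; omega) (fun x hx => hd x (by simp [hx])) [] _]
          have hlm : linesM (c :: r) = [] :: linesM r := by
            rw [linesM, if_neg h1, if_pos h2]
          rw [hlm]
          by_cases hre : r = []
          · subst hre
            simp [linesM]
          · obtain ⟨p, ps, hps⟩ := List.exists_cons_of_ne_nil (linesM_ne_nil r hre)
            simp [hps, hre]
        · have hb : (c = '\n' || c = '\r') = false := by
            simp only [Bool.or_eq_false_iff, decide_eq_false_iff_not]
            exact ⟨fun h => h2 (Or.inl h), fun h => h2 (Or.inr h)⟩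
          rw [hb, if_neg (by simp)]
          rw [ih r (by simp at h; omega) (fun x hx => hd x (by simp [hx])) (c :: cur) acc]
          have hlm : linesM (c :: r) = (c :: (linesM r).headD []) :: (linesM r).tail := by
            rw [linesM, if_neg h1, if_neg h2]
            cases hlr : linesM r with
            | nil =>
              have : r = [] := by
                by_contra hne
                exact linesM_ne_nil r hne hlr
              subst this
              simp
            | cons p ps => simp
          rw [hlm]
          by_cases hre : r = []
          · subst hre
            simp [linesM]
          · obtain ⟨p, ps, hps⟩ := List.exists_cons_of_ne_nil (linesM_ne_nil r hre)
            simp [hps, hre]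

theorem splitlines_eq_linesM (cs : List Char) (hd : ∀ c ∈ cs, pvDomChar c = true) :
    PySem.Chars.splitlines cs = linesM cs := by
  have : PySem.Chars.splitlines cs = PySem.Chars.splitlines.go pyB cs [] [] := rfl
  rw [this, go_lines cs.length cs le_rfl hd [] []]
  by_cases h : cs = []
  · subst h; simp [linesM]
  · obtain ⟨p, ps, hps⟩ := List.exists_cons_of_ne_nil (linesM_ne_nil cs h)
    simp [hps, h]

-- head of the current line is the head of the tape
theorem flCs_head (r : List Char) (x : Char) (h : (flCs r).head? = some x) :
    r.head? = some x := by
  cases r with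
  | nil => simp [flCs] at h
  | cons d t =>
    simp only [flCs, List.takeWhile_cons] at h
    by_cases hb : (!(d = '\n' || d = '\r')) = true
    · rw [if_pos hb] at h
      simpa using h
    · rw [if_neg hb] at h
      simp at h

-- ===== THE MAIN INVARIANT: the scanner computes per-line statements =====
theorem scanner_inv : ∀ (n : ℕ) (cs : List Char), cs.length ≤ n →
    (∀ c ∈ cs, pvDomChar c = true) →
    ∀ (out : List String) (buf pend : List Char) (comment : Bool),
    (∀ x, buf.head? = some x → PySem.Chars.isspace x = false) →
    (∀ x, buf.getLast? = some x → PySem.Chars.isspace x = false) →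
    (∀ x ∈ buf, x ≠ ';') →
    (∀ x ∈ pend, PySem.Chars.isspace x = true) →
    (buf = [] → pend = []) →
    pvAltGo out buf pend comment cs
      = out ++ ((if comment then (if buf = [] then [] else [buf])
            else stmts (buf ++ pend ++ cutR (flCs cs)))
          ++ (linesM (restL cs)).flatMap gC).map String.ofList := by
  intro n
  induction n with
  | zero =>
    intro cs h hd out buf pend comment hh hl hs hp he
    rw [List.length_eq_zero_iff.mp (Nat.le_zero.mp h)]
    rw [pvAltGo]
    have hfl : flCs ([] : List Char) = [] := rfl
    have hrl : restL ([] : List Char) = [] := rfl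
    rw [hfl, hrl]
    have hflush := flush_eq buf pend hh hl hs hp he
    have hcut : cutR [] = [] := rfl
    rw [hcut, List.append_nil]
    rw [hflush]
    by_cases hb : buf = [] <;> cases comment <;> simp [hb, linesM]
  | succ m ih =>
    intro cs h hd out buf pend comment hh hl hs hp he
    cases cs with
    | nil =>
      rw [pvAltGo]
      have hflush := flush_eq buf pend hh hl hs hp he
      have : stmts (buf ++ pend ++ cutR (flCs [])) = stmts (buf ++ pend) := by
        show stmts (buf ++ pend ++ cutR []) = _
        simp [cutR]
      rw [show restL ([] : List Char) = [] from rfl]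
      rw [this, hflush]
      by_cases hb : buf = [] <;> cases comment <;> simp [hb, linesM]
    | cons c r =>
      have hdr : ∀ x ∈ r, pvDomChar x = true := fun x hx => hd x (by simp [hx])
      have hlr : r.length ≤ m := by simp at h; omega
      have hflush := flush_eq buf pend hh hl hs hp he
      rw [pvAltGo]
      by_cases h1 : c = '\n' ∨ c = '\r'
      · rw [if_pos h1]
        have hfl : flCs (c :: r) = [] := flCs_cons_of_brk h1
        have hemit : (if comment then (if buf = [] then [] else [buf])
            else stmts (buf ++ pend ++ cutR (flCs (c :: r)))) = if buf = [] then [] else [buf] := by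
          cases comment
          · simp only [Bool.false_eq_true, if_false]
            rw [hfl]
            show stmts (buf ++ pend ++ cutR []) = _
            simpa [cutR] using hflush
          · rfl
        rw [hemit]
        by_cases h2 : c = '\r' ∧ r.head? = some '\n'
        · obtain ⟨hc, hr⟩ := h2
          obtain ⟨r2, hr2⟩ : ∃ r2, r = '\n' :: r2 := by
            cases r with
            | nil => simp at hr
            | cons d r2 => exact ⟨r2, by simp at hr; rw [hr]⟩
          subst hr2
          subst hc
          rw [restL_rn]
          -- one step on c, then one no-op step on '\n'
          rw [ih ('\n' :: r2) (by simpa using hlr) (fun x hx => hdr x hx) _ [] [] false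
            (by simp) (by simp) (by simp) (by simp) (by simp)]
          rw [flCs_cons_of_brk (Or.inl rfl),
            restL_cons_brk (Or.inl rfl) (fun hx => absurd hx.1 (by decide))]
          rw [show stmts (([] : List Char) ++ [] ++ cutR []) = [] from by decide]
          by_cases hb : buf = [] <;> simp [hb]
        · rw [restL_cons_brk h1 h2]
          rw [ih r hlr hdr _ [] [] false (by simp) (by simp) (by simp) (by simp) (by simp)]
          rw [flat_first r]
          by_cases hb : buf = [] <;> simp [hb]
      · rw [if_neg h1]
        have hn : c ≠ '\n' := fun e => h1 (Or.inl e)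
        have hrr : c ≠ '\r' := fun e => h1 (Or.inr e)
        have hfl : flCs (c :: r) = c :: flCs r := flCs_cons_of_not hn hrr
        have hrl : restL (c :: r) = restL r := restL_cons_of_not hn hrr
        cases comment with
        | true =>
          rw [if_pos rfl]
          rw [ih r hlr hdr out buf pend true hh hl hs hp he]
          rw [hrl]
          rfl
        | false =>
          rw [if_neg (by simp)]
          by_cases h3 : c = ';'
          · rw [if_pos h3]
            rw [ih r hlr hdr _ [] [] false (by simp) (by simp) (by simp) (by simp) (by simp)]
            rw [hfl, hrl]
            have hcut : cutR (c :: flCs r) = ';' :: cutR (flCs r) := by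
              subst h3
              rw [cutR, if_neg (by simp)]
            rw [hcut]
            rw [show buf ++ pend ++ ';' :: cutR (flCs r)
                = (buf ++ pend) ++ ';' :: cutR (flCs r) by simp, stmts_semi, hflush]
            by_cases hb : buf = [] <;> simp [hb]
          · rw [if_neg h3]
            by_cases h4 : c = '/' ∧ r.head? = some '/'
            · rw [if_pos h4]
              obtain ⟨hc, hr⟩ := h4
              obtain ⟨r2, hr2⟩ : ∃ r2, r = '/' :: r2 := by
                cases r with
                | nil => simp at hr
                | cons d r2 => exact ⟨r2, by simp at hr; rw [hr]⟩
              subst hr2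
              rw [show ('/' :: r2 : List Char).tail = r2 from rfl]
              rw [ih r2 (by simp at hlr; omega) (fun x hx => hdr x (by simp [hx]))
                out buf pend true hh hl hs hp he]
              have hfl2 : flCs ('/' :: r2) = '/' :: flCs r2 :=
                flCs_cons_of_not (by decide) (by decide)
              have hcut : cutR (flCs (c :: '/' :: r2)) = [] := by
                rw [hfl, hfl2, cutR, if_pos ⟨hc, by simp⟩]
              rw [hcut, List.append_nil, hflush]
              have hrl2 : restL ('/' :: r2) = restL r2 :=
                restL_cons_of_not (by decide) (by decide)
              rw [hrl, hrl2]
              simp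
            · rw [if_neg h4]
              have hcuthead : ¬ (c = '/' ∧ (flCs r).head? = some '/') := by
                rintro ⟨hc, hhd⟩
                exact h4 ⟨hc, flCs_head r '/' hhd⟩
              have hcut : cutR (flCs (c :: r)) = c :: cutR (flCs r) := by
                rw [hfl, cutR, if_neg hcuthead]
              by_cases h5 : c = ' ' ∨ c = '\t'
              · rw [if_pos h5]
                have hws : PySem.Chars.isspace c = true := by
                  rcases h5 with h5 | h5 <;> subst h5 <;> decide
                by_cases hb : buf = []
                · rw [if_neg (by simp [hb])]  -- pend unchanged branch: buf = [] means if-false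
                  rw [ih r hlr hdr out buf pend false hh hl hs hp he]
                  rw [hrl, hcut]
                  rw [hb, he hb]
                  simp only [List.nil_append]
                  rw [stmts_ws_cons hws]
                · rw [if_pos hb]
                  rw [ih r hlr hdr out buf (pend ++ [c]) false hh hl hs
                    (fun x hx => by
                      rcases List.mem_append.mp hx with hx | hx
                      · exact hp x hx
                      · simp at hx; subst hx; exact hws)
                    (fun hbe => absurd hbe hb)]
                  rw [hrl, hcut]
                  have : buf ++ (pend ++ [c]) ++ cutR (flCs r)
                      = buf ++ pend ++ c :: cutR (flCs r) := by simp
                  rw [this]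
              · rw [if_neg h5]
                have hnws : PySem.Chars.isspace c = false := by
                  apply dom_not_ws (hd c (by simp))
                  · intro hx; exact h5 (Or.inl hx)
                  · intro hx; exact h5 (Or.inr hx)
                  · intro hx; exact h1 (Or.inl hx)
                  · intro hx; exact h1 (Or.inr hx)
                rw [ih r hlr hdr out (buf ++ pend ++ [c]) [] false
                  (fun x hx => by
                    cases hb : buf with
                    | nil =>
                      rw [hb, he hb] at hx
                      simp at hx
                      subst hx; exact hnws
                    | cons b t =>
                      rw [hb] at hx
                      simp at hx
                      subst hx
                      exact hh b (by rw [hb]; rfl))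
                  (fun x hx => by
                    rw [List.getLast?_concat] at hx
                    injection hx with hx
                    subst hx; exact hnws)
                  (fun x hx => by
                    rcases List.mem_append.mp hx with hx | hx
                    · rcases List.mem_append.mp hx with hx | hx
                      · exact hs x hx
                      · exact ws_ne_semi (hp x hx)
                    · simp at hx; subst hx; exact h3)
                  (by simp) (by simp)]
                rw [hrl, hcut]
                have : buf ++ pend ++ [c] ++ [] ++ cutR (flCs r)
                    = buf ++ pend ++ c :: cutR (flCs r) := by simp
                rw [this]
                simp

theorem B_eq (qasm : String) (hd : ∀ c ∈ qasm.toList, pvDomChar c = true) :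
    split_qasm_statements_alt qasm
      = ((linesM qasm.toList).flatMap gC).map String.ofList := by
  show pvAltGo [] [] [] false qasm.toList = _
  rw [scanner_inv qasm.toList.length qasm.toList le_rfl hd [] [] [] false
    (by simp) (by simp) (by simp) (by simp) (by simp)]
  rw [flat_first qasm.toList]
  simp

-- ===== VERDICT (by name: the statement is the Claim_ definition above) =====
theorem split_qasm_statements_spec : Claim_equal_split_qasm_statements := by
  intro qasm hdom
  unfold Spec_split_qasm_statements
  have hd : ∀ c ∈ qasm.toList, pvDomChar c = true := by
    have := hdom
    unfold Dom_split_qasm_statements pvDomStr at this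
    exact fun c hc => List.all_eq_true.mp this c hc
  rw [A_eq, B_eq qasm hd, splitlines_eq_linesM qasm.toList hd]
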